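-- pv_equiv track=rewrite | github.com/Eyalcohenx/NLP-Course | ass4/submit/eval.py | create_y_true__y_predicted
-- ===== SOURCE A (Python) =====
-- def remove_dot(ent):
--     if ent.endswith("."):
--         return ent[:-1]
--     return ent
--
-- def create_y_true__y_predicted(gold_data, predicted_data):
--     y_true = []
--     y_predicted = []
--     seen_trues = []
--     for gold_sent_data in gold_data:
--         sent_id, ent1, ent2, relation = gold_sent_data
--         if relation == "Live_In":
--             y_true.append(1)
--         else:
--             y_true.append(0)
--         y_to_be_added_to_predicted = 0
--         for predicted_sent in predicted_data:
--             sent_id_g, ent1_g, ent2_g, relation_g = predicted_sent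
--             ent1_g = remove_dot(ent1_g)
--             ent2_g = remove_dot(ent2_g)
--             ent1 = remove_dot(ent1)
--             ent2 = remove_dot(ent2)
--             if sent_id == sent_id_g and ent1 == ent1_g and ent2 == ent2_g and relation == relation_g:
--                 y_to_be_added_to_predicted = 1
--                 seen_trues.append(predicted_sent)
--         y_predicted.append(y_to_be_added_to_predicted)
--     for predicted_sent in predicted_data:
--         if predicted_sent not in seen_trues:
--             y_true.append(0)
--             y_predicted.append(1)
--     return y_true, y_predicted
-- ===== SOURCE B (Python) =====
-- def remove_dot(ent):
--     if ent.endswith("."):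
--         return ent[:-1]
--     return ent
--
-- def create_y_true__y_predicted(gold_data, predicted_data):
--     pred_keys = [(sid, remove_dot(e1), remove_dot(e2), rel)
--                  for sid, e1, e2, rel in predicted_data]
--     pred_key_set = set(pred_keys)
--     gold_key_set = {(sid, remove_dot(e1), remove_dot(e2), rel)
--                     for sid, e1, e2, rel in gold_data}
--     y_true = [1 if rel == "Live_In" else 0 for _, _, _, rel in gold_data]
--     y_predicted = [1 if (sid, remove_dot(e1), remove_dot(e2), rel) in pred_key_set else 0
--                    for sid, e1, e2, rel in gold_data]
--     for key in pred_keys: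
--         if key not in gold_key_set:
--             y_true.append(0)
--             y_predicted.append(1)
--     return y_true, y_predicted
-- ===== Notes on version B (the rewrite author's own statement) =====
-- stated objective: faster
-- what changed: B precomputes the normalized key sets of both lists once and answers each gold tuple and each predicted row by a single set lookup, replacing A's nested rescan of predicted_data per gold tuple and its seen_trues list; Pre_ excludes inputs where a gold entity ends in two or more dots while at least two predicted rows exist, on which A's comparisons apply an unspecified, position-dependent number of trailing-dot strips to the gold pair and either reading is defensible.
import Mathlib
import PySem

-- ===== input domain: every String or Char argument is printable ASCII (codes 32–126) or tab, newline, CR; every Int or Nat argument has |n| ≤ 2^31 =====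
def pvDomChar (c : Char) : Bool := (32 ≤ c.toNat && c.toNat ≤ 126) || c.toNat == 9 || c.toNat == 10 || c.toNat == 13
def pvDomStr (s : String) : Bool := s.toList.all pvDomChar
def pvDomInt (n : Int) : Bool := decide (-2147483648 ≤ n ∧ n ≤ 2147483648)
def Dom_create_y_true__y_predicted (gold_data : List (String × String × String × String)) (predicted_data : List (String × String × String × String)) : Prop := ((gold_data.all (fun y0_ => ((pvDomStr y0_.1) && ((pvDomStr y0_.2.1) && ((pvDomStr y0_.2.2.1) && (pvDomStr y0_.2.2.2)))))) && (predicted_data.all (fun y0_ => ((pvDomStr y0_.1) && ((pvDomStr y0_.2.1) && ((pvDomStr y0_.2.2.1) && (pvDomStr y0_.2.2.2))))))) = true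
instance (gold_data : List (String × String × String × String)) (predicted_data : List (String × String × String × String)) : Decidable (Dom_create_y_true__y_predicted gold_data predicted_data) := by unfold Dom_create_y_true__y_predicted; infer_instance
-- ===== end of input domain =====

-- B replaces A's nested rescan of predicted_data per gold tuple by normalized key sets built once,
-- answering every gold tuple and every predicted row with one set lookup (objective: faster).
abbrev PVT := String × String × String × String

-- ===== PORT A =====
def remove_dot (ent : String) : String :=
  if PySem.Str.endswith ent "." then PySem.Str.slice ent none (some (-1)) else ent

-- loop body of A's inner 'for predicted_sent in predicted_data' (state: ent1, ent2, y_to_be_added, seen_trues)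
def pvInnerStepA (sent_id relation : String) (acc : String × String × Int × List PVT) (p : PVT) :
    String × String × Int × List PVT :=
  let ent1_g := remove_dot p.2.1
  let ent2_g := remove_dot p.2.2.1
  let ent1 := remove_dot acc.1
  let ent2 := remove_dot acc.2.1
  if sent_id = p.1 ∧ ent1 = ent1_g ∧ ent2 = ent2_g ∧ relation = p.2.2.2 then
    (ent1, ent2, 1, acc.2.2.2 ++ [p])
  else
    (ent1, ent2, acc.2.2.1, acc.2.2.2)

-- loop body of A's outer 'for gold_sent_data in gold_data' (state: y_true, y_predicted, seen_trues)
def pvOuterStepA (predicted_data : List PVT) (st : List Int × List Int × List PVT) (g : PVT) :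
    List Int × List Int × List PVT :=
  let y_true := st.1 ++ [if g.2.2.2 = "Live_In" then (1 : Int) else 0]
  let inner := predicted_data.foldl (pvInnerStepA g.1 g.2.2.2) (g.2.1, g.2.2.1, 0, st.2.2)
  (y_true, st.2.1 ++ [inner.2.2.1], inner.2.2.2)

-- loop body of A's final 'for predicted_sent in predicted_data'
def pvFinalStepA (seen : List PVT) (acc : List Int × List Int) (p : PVT) : List Int × List Int :=
  if p ∉ seen then (acc.1 ++ [(0 : Int)], acc.2 ++ [(1 : Int)]) else acc

def create_y_true__y_predicted (gold_data : List (String × String × String × String)) (predicted_data : List (String × String × String × String)) : List Int × List Int :=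
  let st := gold_data.foldl (pvOuterStepA predicted_data) ([], [], [])
  predicted_data.foldl (pvFinalStepA st.2.2) (st.1, st.2.1)

-- ===== PORT B =====
-- the normalized key B computes for every tuple: (sid, remove_dot(e1), remove_dot(e2), rel)
def pvKeyB (t : PVT) : PVT := (t.1, remove_dot t.2.1, remove_dot t.2.2.1, t.2.2.2)

-- body of B's final 'for key in pred_keys'
def pvFinalStepB (gold_key_set : PySem.Set PVT) (acc : List Int × List Int) (k : PVT) :
    List Int × List Int :=
  if ¬ k ∈ gold_key_set then (acc.1 ++ [(0 : Int)], acc.2 ++ [(1 : Int)]) else acc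

def create_y_true__y_predicted_alt (gold_data : List (String × String × String × String)) (predicted_data : List (String × String × String × String)) : List Int × List Int :=
  let pred_keys := predicted_data.map pvKeyB
  let pred_key_set := PySem.Set.ofList pred_keys
  let gold_key_set := PySem.Set.ofList (gold_data.map pvKeyB)
  let y_true := gold_data.map (fun g => if g.2.2.2 = "Live_In" then (1 : Int) else 0)
  let y_predicted := gold_data.map (fun g => if pvKeyB g ∈ pred_key_set then (1 : Int) else 0)
  pred_keys.foldl (pvFinalStepB gold_key_set) (y_true, y_predicted)

-- ===== PRECONDITION & SPEC =====
-- Pre_ excludes inputs where some gold entity ends in two or more dots while there are at least two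
-- predicted rows: there A's comparisons apply different numbers of trailing-dot strips to the gold pair
-- at different predicted positions — a normalization depth nobody specifies — so A's and B's
-- (single-strip) readings of such entities are both defensible; B does the natural single strip there.
def Pre_create_y_true__y_predicted (gold_data : List (String × String × String × String)) (predicted_data : List (String × String × String × String)) : Prop :=
  ¬ (2 ≤ predicted_data.length ∧ ∃ g ∈ gold_data,
      PySem.Str.endswith g.2.1 ".." = true ∨ PySem.Str.endswith g.2.2.1 ".." = true)
instance (gold_data : List (String × String × String × String)) (predicted_data : List (String × String × String × String)) : Decidable (Pre_create_y_true__y_predicted gold_data predicted_data) := by unfold Pre_create_y_true__y_predicted; infer_instance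

def pvWitness_create_y_true__y_predicted : (List (String × String × String × String)) × (List (String × String × String × String)) :=
  ([("1", "a.", "b", "Live_In")], [("1", "a", "b", "Live_In")])

def Spec_create_y_true__y_predicted (gold_data : List (String × String × String × String)) (predicted_data : List (String × String × String × String)) (out : List Int × List Int) : Prop := out = create_y_true__y_predicted_alt gold_data predicted_data
instance (gold_data : List (String × String × String × String)) (predicted_data : List (String × String × String × String)) (out : List Int × List Int) : Decidable (Spec_create_y_true__y_predicted gold_data predicted_data out) := by unfold Spec_create_y_true__y_predicted; infer_instance

-- ===== CLAIM (what is proved, stated in full; the proofs are below) =====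
def Claim_equal_create_y_true__y_predicted : Prop := ∀ (gold_data : List (String × String × String × String)) (predicted_data : List (String × String × String × String)), Dom_create_y_true__y_predicted gold_data predicted_data → Pre_create_y_true__y_predicted gold_data predicted_data → Spec_create_y_true__y_predicted gold_data predicted_data (create_y_true__y_predicted gold_data predicted_data)

-- ===== LEMMAS AND PROOFS =====

def pvStripN : Nat → String → String
  | 0, s => s
  | n + 1, s => pvStripN n (remove_dot s)

-- the comparison A's inner loop applies to a gold tuple g against the predicted row at index i
def pvCondA (g p : PVT) (i : Nat) : Prop :=
  g.1 = p.1 ∧ pvStripN (i + 1) g.2.1 = remove_dot p.2.1 ∧ pvStripN (i + 1) g.2.2.1 = remove_dot p.2.2.1 ∧ g.2.2.2 = p.2.2.2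
-- the single-strip comparison B applies
def pvCondB (g p : PVT) : Prop :=
  g.1 = p.1 ∧ remove_dot g.2.1 = remove_dot p.2.1 ∧ remove_dot g.2.2.1 = remove_dot p.2.2.1 ∧ g.2.2.2 = p.2.2.2

theorem pv_stripN_iter : ∀ (n : Nat) (s : String), remove_dot^[n] s = pvStripN n s
  | 0, s => rfl
  | n + 1, s => by rw [Function.iterate_succ_apply, pv_stripN_iter n (remove_dot s)]; rfl

-- spec of A's inner loop: the match flag and the matched rows, following A's progressive stripping
def pvAmatch (sid rel : String) (a b : String) (ps : List PVT) : Bool :=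
  match ps with
  | [] => false
  | p :: t =>
      (decide (sid = p.1 ∧ remove_dot a = remove_dot p.2.1 ∧ remove_dot b = remove_dot p.2.2.1 ∧ rel = p.2.2.2))
        || pvAmatch sid rel (remove_dot a) (remove_dot b) t

def pvAseen (sid rel : String) (a b : String) (ps : List PVT) : List PVT :=
  match ps with
  | [] => []
  | p :: t =>
      (if sid = p.1 ∧ remove_dot a = remove_dot p.2.1 ∧ remove_dot b = remove_dot p.2.2.1 ∧ rel = p.2.2.2 then [p] else [])
        ++ pvAseen sid rel (remove_dot a) (remove_dot b) t

theorem pv_inner_spec (sid rel : String) (ps : List PVT) :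
    ∀ (a b : String) (y : Int) (seen : List PVT),
      (ps.foldl (pvInnerStepA sid rel) (a, b, y, seen)).2.2 =
        ((if pvAmatch sid rel a b ps then 1 else y), seen ++ pvAseen sid rel a b ps) := by
  induction ps with
  | nil => intro a b y seen; simp [pvAmatch, pvAseen]
  | cons p t ih =>
    intro a b y seen
    by_cases hc : sid = p.1 ∧ remove_dot a = remove_dot p.2.1 ∧ remove_dot b = remove_dot p.2.2.1 ∧ rel = p.2.2.2
    · simp only [List.foldl_cons, pvInnerStepA, if_pos hc]
      rw [ih]
      simp [pvAmatch, pvAseen, hc]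
    · simp only [List.foldl_cons, pvInnerStepA, if_neg hc]
      rw [ih]
      simp [pvAmatch, pvAseen, hc]

theorem pv_outer_spec (predicted : List PVT) :
    ∀ (gs : List PVT) (yt yp : List Int) (seen : List PVT),
      gs.foldl (pvOuterStepA predicted) (yt, yp, seen) =
        (yt ++ gs.map (fun g => if g.2.2.2 = "Live_In" then (1 : Int) else 0),
         yp ++ gs.map (fun g => if pvAmatch g.1 g.2.2.2 g.2.1 g.2.2.1 predicted then (1 : Int) else 0),
         seen ++ gs.flatMap (fun g => pvAseen g.1 g.2.2.2 g.2.1 g.2.2.1 predicted)) := by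
  intro gs
  induction gs with
  | nil => intro yt yp seen; simp
  | cons g t ih =>
    intro yt yp seen
    simp only [List.foldl_cons, pvOuterStepA, pv_inner_spec]
    rw [ih]
    simp [List.append_assoc]

theorem pv_final_spec (seen : List PVT) :
    ∀ (qs : List PVT) (yt yp : List Int),
      qs.foldl (pvFinalStepA seen) (yt, yp) =
        (yt ++ (qs.filter (fun q => decide (q ∉ seen))).map (fun _ => (0 : Int)),
         yp ++ (qs.filter (fun q => decide (q ∉ seen))).map (fun _ => (1 : Int))) := by
  intro qs
  induction qs with
  | nil => intro yt yp; simp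
  | cons q t ih =>
    intro yt yp
    by_cases hq : q ∈ seen
    · simp only [List.foldl_cons, pvFinalStepA, hq, not_true_eq_false, if_false]
      rw [ih]
      simp [hq]
    · simp only [List.foldl_cons, pvFinalStepA, hq, not_false_eq_true, if_true]
      rw [ih]
      simp [hq]

-- spec of B's final loop
def pvD0 : PVT := ("", "", "", "")

theorem pv_bfinal_spec (gks : PySem.Set PVT) :
    ∀ (ks : List PVT) (yt yp : List Int),
      ks.foldl (pvFinalStepB gks) (yt, yp) =
        (yt ++ (ks.filter (fun k => decide (¬ k ∈ gks))).map (fun _ => (0 : Int)),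
         yp ++ (ks.filter (fun k => decide (¬ k ∈ gks))).map (fun _ => (1 : Int))) := by
  intro ks
  induction ks with
  | nil => intro yt yp; simp
  | cons k t ih =>
    intro yt yp
    by_cases hk : k ∈ gks
    · simp only [List.foldl_cons, pvFinalStepB, hk, not_true_eq_false, if_false]
      rw [ih]
      simp [hk]
    · simp only [List.foldl_cons, pvFinalStepB, hk, not_false_eq_true, if_true]
      rw [ih]
      simp [hk]

-- index characterization of A's progressive match flag
theorem pv_amatch_idx (sid rel : String) (ps : List PVT) :
    ∀ (a b : String),
      pvAmatch sid rel a b ps = true ↔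
        ∃ i < ps.length,
          (sid = (ps.getD i pvD0).1 ∧ pvStripN (i + 1) a = remove_dot (ps.getD i pvD0).2.1 ∧
           pvStripN (i + 1) b = remove_dot (ps.getD i pvD0).2.2.1 ∧ rel = (ps.getD i pvD0).2.2.2) := by
  induction ps with
  | nil => intro a b; simp [pvAmatch]
  | cons p t ih =>
    intro a b
    rw [pvAmatch, Bool.or_eq_true, decide_eq_true_eq, ih (remove_dot a) (remove_dot b)]
    constructor
    · rintro (h0 | ⟨i, hi, hc⟩)
      · exact ⟨0, by simp, h0⟩
      · exact ⟨i + 1, by simpa using hi, hc⟩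
    · rintro ⟨i, hi, hc⟩
      match i with
      | 0 => exact Or.inl hc
      | i + 1 => exact Or.inr ⟨i, by simpa using hi, hc⟩

-- index characterization of A's matched-row list
theorem pv_aseen_idx (sid rel : String) (ps : List PVT) :
    ∀ (a b : String) (q : PVT),
      q ∈ pvAseen sid rel a b ps ↔
        ∃ i < ps.length,
          (sid = (ps.getD i pvD0).1 ∧ pvStripN (i + 1) a = remove_dot (ps.getD i pvD0).2.1 ∧
           pvStripN (i + 1) b = remove_dot (ps.getD i pvD0).2.2.1 ∧ rel = (ps.getD i pvD0).2.2.2) ∧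
          ps.getD i pvD0 = q := by
  induction ps with
  | nil => intro a b q; simp [pvAseen]
  | cons p t ih =>
    intro a b q
    rw [pvAseen, List.mem_append, ih (remove_dot a) (remove_dot b) q]
    constructor
    · rintro (h0 | ⟨i, hi, hc, hq⟩)
      · by_cases hc : sid = p.1 ∧ remove_dot a = remove_dot p.2.1 ∧ remove_dot b = remove_dot p.2.2.1 ∧ rel = p.2.2.2
        · rw [if_pos hc] at h0
          simp only [List.mem_singleton] at h0
          exact ⟨0, by simp, hc, h0.symm⟩
        · rw [if_neg hc] at h0
          simp at h0
      · exact ⟨i + 1, by simpa using hi, hc, hq⟩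
    · rintro ⟨i, hi, hc, hq⟩
      match i with
      | 0 =>
        left
        simp only [List.getD_cons_zero] at hc hq
        have hc' : sid = p.1 ∧ remove_dot a = remove_dot p.2.1 ∧ remove_dot b = remove_dot p.2.2.1 ∧ rel = p.2.2.2 := by
          simpa [pvStripN] using hc
        rw [if_pos hc']
        simp [hq]
      | i + 1 => exact Or.inr ⟨i, by simpa using hi, hc, hq⟩

-- pvCondB is equality of normalized keys
theorem pv_condB_key (g p : PVT) : pvCondB g p ↔ pvKeyB g = pvKeyB p := by
  simp only [pvCondB, pvKeyB, Prod.ext_iff]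

-- the pointwise agreement ¬D_ yields, specialized to one gold tuple
-- a string not ending in ".." yields a dot-free result after one strip
theorem pv_rd_idem (e : String) (h : PySem.Str.endswith e ".." = false) :
    remove_dot (remove_dot e) = remove_dot e := by
  by_cases h1 : PySem.Str.endswith e "." = true
  · have h1' : ('.' :: []) <:+ e.toList := by
      have := (PySem.Chars.endswith_iff e.toList ".".toList).mp (by simpa using h1)
      simpa using this
    obtain ⟨t, ht⟩ := h1'
    have hdl : e.toList.dropLast = t := by rw [← ht, List.dropLast_concat]
    have h2 : PySem.Str.endswith (PySem.Str.slice e none (some (-1))) "." = false := by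
      simp only [PySem.Str.endswith_eq, PySem.Str.toList_slice, PySem.Chars.slice_eq_listSlice,
        PySem.List.slice_to_neg_one, hdl]
      rw [Bool.eq_false_iff]
      intro hT
      have hsuf : ('.' :: []) <:+ t := by
        have := (PySem.Chars.endswith_iff t ".".toList).mp (by simpa using hT)
        simpa using this
      obtain ⟨u, hu⟩ := hsuf
      have : ('.' :: '.' :: []) <:+ e.toList := ⟨u, by rw [← ht, ← hu]; simp⟩
      have hcontra := (PySem.Chars.endswith_iff e.toList "..".toList).mpr (by simpa using this)
      rw [PySem.Str.endswith_eq] at h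
      simp only [h] at hcontra
      exact absurd hcontra (by simp)
    have hrd : remove_dot e = PySem.Str.slice e none (some (-1)) := by
      simp only [remove_dot, h1, if_true]
    rw [hrd]
    simp only [remove_dot, h2, Bool.false_eq_true, if_false]
  · have h1f : PySem.Str.endswith e "." = false := Bool.eq_false_iff.mpr h1
    have : remove_dot e = e := by simp only [remove_dot, h1f, Bool.false_eq_true, if_false]
    rw [this]
    exact this

theorem pv_stripN_fix (n : Nat) (s : String) (hid : remove_dot (remove_dot s) = remove_dot s) :
    pvStripN n (remove_dot s) = remove_dot s := by
  induction n with
  | zero => rfl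
  | succ n ih =>
    show pvStripN n (remove_dot (remove_dot s)) = remove_dot s
    rw [hid]
    exact ih

theorem pv_stripN_stable (n : Nat) (e : String) (h : PySem.Str.endswith e ".." = false) :
    pvStripN (n + 1) e = remove_dot e := pv_stripN_fix n e (pv_rd_idem e h)

-- the pointwise agreement Pre_ yields, specialized to one gold tuple
theorem pv_not_D_pt {gold pred : List PVT}
    (hnd : Pre_create_y_true__y_predicted gold pred) {g : PVT} (hg : g ∈ gold) :
    ∀ i < pred.length, pvCondA g (pred.getD i pvD0) i ↔ pvCondB g (pred.getD i pvD0) := by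
  intro i hi
  match i with
  | 0 => exact Iff.rfl
  | i + 1 =>
    have hlen : 2 ≤ pred.length := by omega
    have hg2 : ¬ (PySem.Str.endswith g.2.1 ".." = true ∨ PySem.Str.endswith g.2.2.1 ".." = true) :=
      fun hc => hnd ⟨hlen, g, hg, hc⟩
    push_neg at hg2
    obtain ⟨he1, he2⟩ := hg2
    unfold pvCondA pvCondB
    rw [pv_stripN_stable _ _ (Bool.eq_false_iff.mpr he1), pv_stripN_stable _ _ (Bool.eq_false_iff.mpr he2)]

-- under Pre_, A's match flag for g is B's set-membership test
theorem pv_match_eq_key {gold pred : List PVT}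
    (hnd : Pre_create_y_true__y_predicted gold pred) {g : PVT} (hg : g ∈ gold) :
    pvAmatch g.1 g.2.2.2 g.2.1 g.2.2.1 pred = decide (pvKeyB g ∈ pred.map pvKeyB) := by
  have hpt := pv_not_D_pt hnd hg
  rw [Bool.eq_iff_iff, pv_amatch_idx, decide_eq_true_eq]
  constructor
  · rintro ⟨i, hi, hc⟩
    have hb : pvCondB g (pred.getD i pvD0) := (hpt i hi).mp hc
    rw [pv_condB_key] at hb
    rw [hb]
    exact List.mem_map_of_mem (by rw [List.getD_eq_getElem _ _ hi]; exact List.getElem_mem hi)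
  · intro hmem
    obtain ⟨p, hp, hkey⟩ := List.mem_map.mp hmem
    obtain ⟨i, hi, rfl⟩ := List.mem_iff_getElem.mp hp
    have hget : pred.getD i pvD0 = pred[i] := List.getD_eq_getElem _ _ hi
    refine ⟨i, hi, (hpt i hi).mpr ?_⟩
    rw [pv_condB_key, hget]
    exact hkey.symm
  
-- under Pre_, membership in the matched-row pool is B's gold-key test
theorem pv_seen_eq_key {gold pred : List PVT}
    (hnd : Pre_create_y_true__y_predicted gold pred) {q : PVT} (hq : q ∈ pred) :
    (q ∈ gold.flatMap (fun g => pvAseen g.1 g.2.2.2 g.2.1 g.2.2.1 pred)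
      ↔ pvKeyB q ∈ gold.map pvKeyB) := by
  rw [List.mem_flatMap]
  constructor
  · rintro ⟨g, hg, hmem⟩
    obtain ⟨i, hi, hc, hgi⟩ := (pv_aseen_idx g.1 g.2.2.2 pred g.2.1 g.2.2.1 q).mp hmem
    have hb : pvCondB g (pred.getD i pvD0) := (pv_not_D_pt hnd hg i hi).mp hc
    rw [pv_condB_key, hgi] at hb
    rw [← hb]
    exact List.mem_map_of_mem hg
  · intro hmem
    obtain ⟨g, hg, hkey⟩ := List.mem_map.mp hmem
    refine ⟨g, hg, ?_⟩
    obtain ⟨i, hi, rfl⟩ := List.mem_iff_getElem.mp hq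
    have hget : pred.getD i pvD0 = pred[i] := List.getD_eq_getElem _ _ hi
    refine (pv_aseen_idx g.1 g.2.2.2 pred g.2.1 g.2.2.1 _).mpr ⟨i, hi, ?_, hget⟩
    exact (pv_not_D_pt hnd hg i hi).mpr ((pv_condB_key g _).mpr (by rw [hget]; exact hkey))

-- ===== VERDICT (by name: the statement is the Claim_ definition above) =====
theorem create_y_true__y_predicted_spec : Claim_equal_create_y_true__y_predicted := by
  intro gold pred _ hnd
  unfold Spec_create_y_true__y_predicted
  simp only [create_y_true__y_predicted, create_y_true__y_predicted_alt]
  rw [pv_outer_spec, pv_final_spec, pv_bfinal_spec]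
  simp only [List.nil_append]
  have hyp : gold.map (fun g => if pvAmatch g.1 g.2.2.2 g.2.1 g.2.2.1 pred then (1 : Int) else 0)
      = gold.map (fun g => if pvKeyB g ∈ PySem.Set.ofList (pred.map pvKeyB) then (1 : Int) else 0) := by
    refine List.map_congr_left (fun g hg => ?_)
    rw [pv_match_eq_key hnd hg]
    by_cases hm : pvKeyB g ∈ pred.map pvKeyB
    · simp [hm, (PySem.Set.mem_ofList _ _).mpr hm]
    · have : ¬ pvKeyB g ∈ PySem.Set.ofList (pred.map pvKeyB) := fun h => hm ((PySem.Set.mem_ofList _ _).mp h)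
      simp [hm, this]
  have htail : (pred.map pvKeyB).filter (fun k => decide (¬ k ∈ PySem.Set.ofList (gold.map pvKeyB)))
      = (pred.filter (fun q => decide (q ∉ gold.flatMap (fun g => pvAseen g.1 g.2.2.2 g.2.1 g.2.2.1 pred)))).map pvKeyB := by
    rw [List.filter_map]
    refine congrArg _ (List.filter_congr (fun q hq => ?_))
    simp only [Function.comp_apply, decide_eq_decide, PySem.Set.mem_ofList]
    exact not_congr (pv_seen_eq_key hnd hq).symm
  refine Prod.ext ?_ ?_
  · simp only
    rw [htail, List.map_map]
    rfl
  · simp only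
    rw [hyp, htail, List.map_map]
    rfl
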